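-- pv_equiv track=rewrite | github.com/pypi-data/pypi-mirror-398 | packages/hanzo-mcp/hanzo_mcp-0.9.12.tar.gz/hanzo_mcp-0.9.12/hanzo_mcp/tools/refactor/refactor_tool.py | _extract_call_expression
-- ===== SOURCE A (Python) =====
-- from typing import Any, Dict, List, Optional, Tuple, Set, AsyncIterator
--
-- def _extract_call_expression(
--
--     lines: List[str],
--     line_idx: int,
--     start_col: int,
-- ) -> Tuple[Optional[str], int]:
--     """Extract a function call expression, handling multiline."""
--     line = lines[line_idx]
--
--     # Find the opening paren
--     paren_start = line.find("(", start_col)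
--     if paren_start < 0:
--         return None, 0
--
--     # Find matching close paren
--     paren_count = 1
--     pos = paren_start + 1
--     current_line = line_idx
--     call_text = line[start_col:paren_start + 1]
--
--     while paren_count > 0:
--         if pos >= len(lines[current_line]):
--             current_line += 1
--             if current_line >= len(lines):
--                 return None, 0
--             pos = 0
--             call_text += "\n" + lines[current_line][:pos]
--             continue
--
--         char = lines[current_line][pos]
--         call_text += char if current_line == line_idx or pos > 0 else ""
--
--         if char == "(":
--             paren_count += 1
--         elif char == ")":
--             paren_count -= 1
--         pos += 1
--
--     # Include the final character
--     if current_line == line_idx: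
--         call_text = line[start_col:paren_start + 1 + (pos - paren_start - 1)]
--
--     # Simple single-line extraction
--     end = line.find(")", paren_start)
--     if end >= 0:
--         return line[start_col:end + 1], end + 1
--
--     return None, 0
-- ===== SOURCE B (Python) =====
-- def _extract_call_expression(lines, line_idx, start_col):
--     """Extract a function call expression, handling multiline."""
--     line = lines[line_idx]
--
--     paren_start = line.find("(", start_col)
--     if paren_start < 0:
--         return None, 0
--
--     # The match scan only decides success/failure: walk the characters after
--     # the opening paren (rest of this line, then the following lines joined).
--     remaining = line[paren_start + 1:] + "".join(lines[line_idx + 1:])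
--     depth = 1
--     for ch in remaining:
--         if ch == "(":
--             depth += 1
--         elif ch == ")":
--             depth -= 1
--         if depth == 0:
--             break
--     else:
--         return None, 0
--
--     # The extraction itself only ever uses the original line.
--     end = line.find(")", paren_start)
--     if end >= 0:
--         return line[start_col:end + 1], end + 1
--     return None, 0
-- ===== Notes on version B (the rewrite author's own statement) =====
-- stated objective: simpler
-- what changed: B drops A's stateful multiline cursor machinery (current_line/pos bookkeeping and the dead call_text accumulator) and instead joins the text after the opening paren into one string and runs a single depth counter over it, since A's result only depends on whether that scan ever balances and on the first ')' in the original line.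
-- outside the precondition, e.g. on _extract_call_expression([')', '((x)', 'z'], -2, 0): A returns ('((x)', 4), B returns (None, 0)
import Mathlib
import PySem

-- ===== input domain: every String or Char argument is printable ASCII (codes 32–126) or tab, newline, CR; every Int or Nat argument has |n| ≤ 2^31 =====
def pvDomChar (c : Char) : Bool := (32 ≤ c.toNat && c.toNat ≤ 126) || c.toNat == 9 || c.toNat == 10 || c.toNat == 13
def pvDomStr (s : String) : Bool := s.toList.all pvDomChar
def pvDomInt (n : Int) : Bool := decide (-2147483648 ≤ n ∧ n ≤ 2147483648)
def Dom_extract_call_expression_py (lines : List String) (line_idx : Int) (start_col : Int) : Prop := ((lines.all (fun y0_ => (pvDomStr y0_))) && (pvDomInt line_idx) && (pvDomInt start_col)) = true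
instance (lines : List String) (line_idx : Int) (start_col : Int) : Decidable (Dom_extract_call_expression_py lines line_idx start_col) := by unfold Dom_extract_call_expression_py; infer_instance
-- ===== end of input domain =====

-- B replaces A's stateful multiline cursor loop (current_line/pos bookkeeping and the
-- dead call_text accumulator) by one depth scan over the joined remaining text; objective: simpler.

-- ===== PORT A =====
-- A's while-loop: state (paren_count, current_line, pos, call_text); returns none where the
-- Python returns (None, 0) from inside the loop, otherwise the final state.
def pvA_loop (lines : List String) (line_idx : Int) (count cur pos : Int) (text : String) :
    Option (Int × Int × String) :=
  if _h0 : count ≤ 0 then some (cur, pos, text)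
  else
    if _h1 : PySem.Str.len ((PySem.List.pyGet? lines cur).getD "") ≤ pos then
      if _h2 : lines.length ≤ cur + 1 then none
      else
        pvA_loop lines line_idx count (cur + 1) 0
          (text ++ "\n" ++ PySem.Str.slice ((PySem.List.pyGet? lines (cur + 1)).getD "") none (some 0))
    else
      let ch := (PySem.Str.pyGet? ((PySem.List.pyGet? lines cur).getD "") pos).getD ' '
      let text := text ++ (if cur == line_idx || decide (0 < pos) then String.ofList [ch] else "")
      let count := if ch = '(' then count + 1 else if ch = ')' then count - 1 else count
      pvA_loop lines line_idx count cur (pos + 1) text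
termination_by ((lines.length - cur).toNat, (PySem.Str.len ((PySem.List.pyGet? lines cur).getD "") - pos).toNat)
decreasing_by
  · left; omega
  · right; omega

def extract_call_expression_py (lines : List String) (line_idx : Int) (start_col : Int) : Option String × Int :=
  match PySem.List.pyGet? lines line_idx with
  | none => (none, 0)  -- lines[line_idx] raises IndexError; excluded by Pre_
  | some line =>
    let paren_start := PySem.Str.findFrom line "(" start_col none
    if paren_start < 0 then (none, 0)
    else
      let call_text := PySem.Str.slice line (some start_col) (some (paren_start + 1))
      match pvA_loop lines line_idx 1 line_idx (paren_start + 1) call_text with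
      | none => (none, 0)
      | some (cur, pos, text) =>
        -- A's final call_text reassignment (dead: call_text is never returned)
        let _call_text :=
          if cur == line_idx
          then PySem.Str.slice line (some start_col) (some (paren_start + 1 + (pos - paren_start - 1)))
          else text
        let e := PySem.Str.findFrom line ")" paren_start none
        if 0 ≤ e then (some (PySem.Str.slice line (some start_col) (some (e + 1))), e + 1)
        else (none, 0)

-- ===== PORT B =====
-- the for/else depth scan of Source B: true iff depth hits 0 before the text runs out
def pvB_balanced : List Char → Int → Bool
  | [], _ => false
  | c :: rest, depth =>
    let d := if c = '(' then depth + 1 else if c = ')' then depth - 1 else depth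
    if d = 0 then true else pvB_balanced rest d

def extract_call_expression_py_alt (lines : List String) (line_idx : Int) (start_col : Int) : Option String × Int :=
  match PySem.List.pyGet? lines line_idx with
  | none => (none, 0)  -- lines[line_idx] raises IndexError; excluded by Pre_
  | some line =>
    let paren_start := PySem.Str.findFrom line "(" start_col none
    if paren_start < 0 then (none, 0)
    else
      let remaining :=
        PySem.Str.slice line (some (paren_start + 1)) none ++
          PySem.Str.join "" (PySem.List.slice lines (some (line_idx + 1)) none)
      if pvB_balanced remaining.toList 1 then
        let e := PySem.Str.findFrom line ")" paren_start none
        if 0 ≤ e then (some (PySem.Str.slice line (some start_col) (some (e + 1))), e + 1)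
        else (none, 0)
      else (none, 0)

-- ===== PRECONDITION & SPEC =====
-- Pre_ excludes line_idx ≥ len(lines) or < -len(lines), where A raises IndexError, and also
-- negative in-range line_idx, where Python's negative-index wraparound makes A's scan run past
-- the last line and re-read the buffer again from line 0 — an accident of A's cursor arithmetic
-- that B's forward slice does not reproduce.
def Pre_extract_call_expression_py (lines : List String) (line_idx : Int) (start_col : Int) : Prop :=
  0 ≤ line_idx ∧ line_idx < lines.length
instance (lines : List String) (line_idx : Int) (start_col : Int) : Decidable (Pre_extract_call_expression_py lines line_idx start_col) := by unfold Pre_extract_call_expression_py; infer_instance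

def pvWitness_extract_call_expression_py : List String × Int × Int := (["foo(a,", "  b)"], 0, 0)

def Spec_extract_call_expression_py (lines : List String) (line_idx : Int) (start_col : Int) (out : Option String × Int) : Prop := out = extract_call_expression_py_alt lines line_idx start_col
instance (lines : List String) (line_idx : Int) (start_col : Int) (out : Option String × Int) : Decidable (Spec_extract_call_expression_py lines line_idx start_col out) := by unfold Spec_extract_call_expression_py; infer_instance

-- ===== CLAIM (what is proved, stated in full; the proofs are below) =====
def Claim_equal_extract_call_expression_py : Prop := ∀ (lines : List String) (line_idx : Int) (start_col : Int), Dom_extract_call_expression_py lines line_idx start_col → Pre_extract_call_expression_py lines line_idx start_col → Spec_extract_call_expression_py lines line_idx start_col (extract_call_expression_py lines line_idx start_col)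

-- ===== LEMMAS AND PROOFS =====

-- the text A's loop still has in front of it: rest of line `cur` from `pos`, then all later lines
def pvTail (lines : List String) (cur pos : Nat) : List Char :=
  ((lines.getD cur "").toList.drop pos) ++ ((lines.drop (cur + 1)).map String.toList).flatten

theorem pvA_loop_isSome_eq_balanced (lines : List String) (line_idx : Int) (count cur pos : Int) (text : String) :
    0 < count → 0 ≤ cur → cur < lines.length → 0 ≤ pos →
    (pvA_loop lines line_idx count cur pos text).isSome =
      pvB_balanced (pvTail lines cur.toNat pos.toNat) count := by
  induction count, cur, pos, text using pvA_loop.induct lines line_idx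
  case case1 => rename_i cnt cur pos txt h0; intro h1 h2 h3 h4; omega
  case case2 =>
    rename_i cnt cur pos txt h0 hp hl
    intro h1 h2 h3 h4
    have hcur : PySem.List.pyGet? lines cur = some lines[cur.toNat] := by
      rw [PySem.List.pyGet?_of_nonneg_of_lt lines h2 h3]
      exact List.getElem?_eq_getElem (by omega)
    have hp' : (lines[cur.toNat].toList.length : Int) ≤ pos := by
      rw [hcur] at hp; simpa [pysem] using hp
    have htail : pvTail lines cur.toNat pos.toNat = [] := by
      unfold pvTail
      rw [List.getD_eq_getElem lines "" (by omega), List.drop_eq_nil_of_le (by omega),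
        List.drop_eq_nil_of_le (by omega)]
      simp
    rw [pvA_loop, htail]
    rw [dif_neg h0, dif_pos hp, dif_pos hl]
    simp [pvB_balanced]
  case case3 =>
    rename_i cnt cur pos txt h0 hp hl ih
    intro h1 h2 h3 h4
    have hcur : PySem.List.pyGet? lines cur = some lines[cur.toNat] := by
      rw [PySem.List.pyGet?_of_nonneg_of_lt lines h2 h3]
      exact List.getElem?_eq_getElem (by omega)
    have hp' : (lines[cur.toNat].toList.length : Int) ≤ pos := by
      rw [hcur] at hp; simpa [pysem] using hp
    have hlt : cur + 1 < (lines.length : Int) := by omega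
    have htail : pvTail lines cur.toNat pos.toNat = pvTail lines (cur + 1).toNat (Int.toNat 0) := by
      unfold pvTail
      rw [List.getD_eq_getElem lines "" (by omega), List.drop_eq_nil_of_le (by omega)]
      rw [List.getD_eq_getElem lines "" (n := (cur + 1).toNat) (by omega)]
      have h5 : (cur + 1).toNat = cur.toNat + 1 := by omega
      simp only [h5]
      simp only [List.nil_append, List.drop_zero, Int.toNat_zero, List.map_drop]
      rw [List.drop_eq_getElem_cons (show cur.toNat + 1 < (List.map String.toList lines).length by
        simpa using (show cur.toNat + 1 < lines.length by omega))]
      simp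
    rw [pvA_loop, htail]
    rw [dif_neg h0, dif_pos hp, dif_neg hl]
    exact ih h1 (by omega) hlt le_rfl
  case case4 =>
    rename_i cnt cur pos txt h0 hp ch text2 cnt2 ih
    intro h1 h2 h3 h4
    have hcur : PySem.List.pyGet? lines cur = some lines[cur.toNat] := by
      rw [PySem.List.pyGet?_of_nonneg_of_lt lines h2 h3]
      exact List.getElem?_eq_getElem (by omega)
    have hp' : pos < (lines[cur.toNat].toList.length : Int) := by
      rw [hcur] at hp; simp [pysem] at hp
      have := (String.length_toList (s := lines[cur.toNat]))
      omega
    have hch : ch = lines[cur.toNat].toList[pos.toNat] := by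
      show ((PySem.Str.pyGet? ((PySem.List.pyGet? lines cur).getD "") pos).getD ' ') = _
      rw [PySem.List.pyGet?_of_nonneg_of_lt lines h2 h3, List.getElem?_eq_getElem (by omega)]
      simp only [Option.getD_some, PySem.Str.pyGet?_eq, PySem.Chars.pyGet?_eq_listPyGet?]
      rw [PySem.List.pyGet?_of_nonneg_of_lt _ h4 (by omega), List.getElem?_eq_getElem (by omega)]
      rfl
    have htail : pvTail lines cur.toNat pos.toNat =
        lines[cur.toNat].toList[pos.toNat] :: pvTail lines cur.toNat (pos + 1).toNat := by
      unfold pvTail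
      rw [List.getD_eq_getElem lines "" (by omega)]
      have h5 : (pos + 1).toNat = pos.toNat + 1 := by omega
      rw [h5, List.drop_eq_getElem_cons (by omega : pos.toNat < lines[cur.toNat].toList.length),
        List.cons_append]
    rw [pvA_loop, dif_neg h0, dif_neg hp, htail, ← hch]
    show (pvA_loop lines line_idx cnt2 cur (pos + 1) text2).isSome =
      if cnt2 = 0 then true else pvB_balanced (pvTail lines cur.toNat (pos + 1).toNat) cnt2
    by_cases hz : cnt2 = 0
    · rw [if_pos hz, pvA_loop, dif_pos hz.le]
      rfl
    · have hpos2 : 0 < cnt2 := by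
        revert hz
        show ¬(if h : ch = '(' then cnt + 1 else if h : ch = ')' then cnt - 1 else cnt) = 0 →
          0 < (if h : ch = '(' then cnt + 1 else if h : ch = ')' then cnt - 1 else cnt)
        split_ifs <;> omega
      rw [if_neg hz]
      exact ih hpos2 h2 h3 (by omega)

theorem pvJoin_nil (l : List (List Char)) : PySem.Chars.join [] l = l.flatten := by
  unfold PySem.Chars.join
  induction l with
  | nil => simp [List.intercalate]
  | cons a t ih => cases t <;> simp_all [List.intercalate, List.intersperse]

theorem extract_call_expression_py_spec : Claim_equal_extract_call_expression_py := by
  intro lines line_idx start_col _hdom hpre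
  obtain ⟨h1, h2⟩ := hpre
  unfold Spec_extract_call_expression_py
  have hcur : PySem.List.pyGet? lines line_idx = some lines[line_idx.toNat] := by
    rw [PySem.List.pyGet?_of_nonneg_of_lt lines h1 h2]
    exact List.getElem?_eq_getElem (by omega)
  unfold extract_call_expression_py extract_call_expression_py_alt
  rw [hcur]
  generalize hl : lines[line_idx.toNat] = line
  dsimp only
  set ps := PySem.Str.findFrom line "(" start_col with hps
  by_cases hneg : ps < 0
  · rw [if_pos hneg, if_pos hneg]
  · rw [if_neg hneg, if_neg hneg]
    have hrem : (PySem.Str.slice line (some (ps + 1)) none ++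
        PySem.Str.join "" (PySem.List.slice lines (some (line_idx + 1)) none)).toList
        = pvTail lines line_idx.toNat (ps + 1).toNat := by
      unfold pvTail
      rw [List.getD_eq_getElem lines "" (by omega), hl]
      simp only [String.toList_append, PySem.Str.toList_slice, PySem.Chars.slice_eq_listSlice,
        PySem.Str.toList_join]
      rw [PySem.List.slice_from line.toList (by omega : (0:Int) ≤ ps + 1),
        PySem.List.slice_from lines (by omega : (0:Int) ≤ line_idx + 1)]
      rw [show ("".toList : List Char) = [] from rfl, pvJoin_nil]
      have h6 : (line_idx + 1).toNat = line_idx.toNat + 1 := by omega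
      simp [h6, List.map_drop]
    have hbal := pvA_loop_isSome_eq_balanced lines line_idx 1 line_idx (ps + 1)
      (PySem.Str.slice line (some start_col) (some (ps + 1))) one_pos h1 h2 (by omega)
    rw [← hrem] at hbal
    cases hloop : pvA_loop lines line_idx 1 line_idx (ps + 1)
        (PySem.Str.slice line (some start_col) (some (ps + 1))) with
    | none => rw [hloop] at hbal; rw [← hbal]; simp
    | some st =>
      obtain ⟨cur, pos, text⟩ := st
      rw [hloop] at hbal
      rw [← hbal]
      simp
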